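-- pv_equiv track=rewrite | github.com/daarismendy/python | ejercicios/ejercicio7.py | wordMetric
-- ===== SOURCE A (Python) =====
-- def wordMetric(palabras):
--     res=0
--     diccionario={}
--     for i in palabras:
--         for x in i:
--             res+=ord(x)
--         diccionario[i]=(len(i),res)
--     return diccionario
-- ===== SOURCE B (Python) =====
-- def wordMetric(palabras):
--     # two-stage: per-word ord sums, then an inclusive prefix scan, then the dict
--     sums = [sum(map(ord, w)) for w in palabras]
--     totals = []
--     t = 0
--     for s in sums:
--         t += s
--         totals.append(t)
--     return {w: (len(w), c) for w, c in zip(palabras, totals)}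
-- ===== Notes on version B (the rewrite author's own statement) =====
-- stated objective: alternative
-- what changed: Replaces A's single interleaved loop mutating a running total and the dict together with a compute-then-prefix-scan decomposition: per-word ord sums, an inclusive running-total list, then a dict comprehension over zip(palabras, totals).
import Mathlib
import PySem

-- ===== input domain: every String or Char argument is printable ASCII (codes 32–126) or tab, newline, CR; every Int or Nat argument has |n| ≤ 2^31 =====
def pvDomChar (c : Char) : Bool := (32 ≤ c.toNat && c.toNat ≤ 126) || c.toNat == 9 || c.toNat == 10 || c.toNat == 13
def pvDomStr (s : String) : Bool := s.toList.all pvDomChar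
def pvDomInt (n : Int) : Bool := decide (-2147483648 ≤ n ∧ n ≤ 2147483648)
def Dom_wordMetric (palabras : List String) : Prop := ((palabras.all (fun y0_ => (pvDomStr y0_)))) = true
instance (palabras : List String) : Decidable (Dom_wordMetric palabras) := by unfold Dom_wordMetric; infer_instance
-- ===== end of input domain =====

-- B replaces A's interleaved running-total-plus-dict loop by a compute-then-prefix-scan
-- decomposition (per-word sums, inclusive scan, then the dict); same cost, alternative structure.

-- ===== PORT A =====
def wordMetric (palabras : List String) : List (String × Int × Int) :=
  (palabras.foldl
    (fun (st : Int × PySem.Dict String (Int × Int)) i =>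
      let res := i.toList.foldl (fun r x => r + (x.toNat : Int)) st.1
      (res, st.2.insert i (PySem.Str.len i, res)))
    (0, PySem.Dict.empty)).2.items

-- ===== PORT B =====
def wordMetric_alt (palabras : List String) : List (String × Int × Int) :=
  let sums := palabras.map (fun w => w.toList.foldl (fun a c => a + (c.toNat : Int)) 0)
  let totals := (sums.foldl (fun (st : Int × List Int) s => (st.1 + s, st.2 ++ [st.1 + s])) (0, [])).2
  ((palabras.zip totals).foldl
    (fun (d : PySem.Dict String (Int × Int)) wc => d.insert wc.1 (PySem.Str.len wc.1, wc.2))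
    PySem.Dict.empty).items

-- ===== PRECONDITION & SPEC =====
def Spec_wordMetric (palabras : List String) (out : List (String × Int × Int)) : Prop := out = wordMetric_alt palabras
instance (palabras : List String) (out : List (String × Int × Int)) : Decidable (Spec_wordMetric palabras out) := by unfold Spec_wordMetric; infer_instance

-- ===== CLAIM (what is proved, stated in full; the proofs are below) =====
def Claim_equal_wordMetric : Prop := ∀ (palabras : List String), Dom_wordMetric palabras → Spec_wordMetric palabras (wordMetric palabras)

-- ===== LEMMAS AND PROOFS =====

/-- the inclusive prefix scan of `sums` starting from running total `t` -/
def pvScan (t : Int) : List Int → List Int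
  | [] => []
  | s :: ss => (t + s) :: pvScan (t + s) ss

def pvWsum (w : String) : Int := w.toList.foldl (fun a c => a + (c.toNat : Int)) 0

theorem pvFoldOrdShift (l : List Char) (t : Int) :
    l.foldl (fun r x => r + (x.toNat : Int)) t = t + l.foldl (fun a c => a + (c.toNat : Int)) 0 := by
  induction l generalizing t with
  | nil => simp
  | cons c cs ih => simp only [List.foldl_cons]; rw [ih, ih ((0:Int) + c.toNat)]; ring

theorem pvScanFold (sums : List Int) (t : Int) (acc : List Int) :
    (sums.foldl (fun (st : Int × List Int) s => (st.1 + s, st.2 ++ [st.1 + s])) (t, acc)).2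
      = acc ++ pvScan t sums := by
  induction sums generalizing t acc with
  | nil => simp [pvScan]
  | cons s ss ih => simp [pvScan, ih]

theorem pvMain (ws : List String) (t : Int) (d : PySem.Dict String (Int × Int)) :
    (ws.foldl
      (fun (st : Int × PySem.Dict String (Int × Int)) i =>
        let res := i.toList.foldl (fun r x => r + (x.toNat : Int)) st.1
        (res, st.2.insert i (PySem.Str.len i, res)))
      (t, d)).2
    = ((ws.zip (pvScan t (ws.map pvWsum))).foldl
        (fun (d : PySem.Dict String (Int × Int)) wc => d.insert wc.1 (PySem.Str.len wc.1, wc.2))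
        d) := by
  induction ws generalizing t d with
  | nil => simp [pvScan]
  | cons i is ih =>
    simp only [List.foldl_cons, List.map_cons, pvScan, List.zip_cons_cons]
    rw [pvFoldOrdShift]
    exact ih (t + pvWsum i) _

-- ===== VERDICT (by name: the statement is the Claim_ definition above) =====
theorem wordMetric_spec : Claim_equal_wordMetric := by
  intro palabras _
  unfold Spec_wordMetric wordMetric wordMetric_alt
  rw [pvMain]
  simp only [pvScanFold, List.nil_append]
  rfl
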